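-- pv_equiv track=rewrite | github.com/embedded-software-laboratory/cpm_lab | high_level_controller/examples/cpp/dynamic_priorities/visualization/visualisation.py | consecutive_new_old_fallback
-- ===== SOURCE A (Python) =====
-- def interval_unit(steps, plan_step_ms, unit):
--     if unit == "steps":
--         return steps
--     else:
--         (steps * plan_step_ms) / 1000
--
-- def consecutive_new_old_fallback(cases):
--     unit = "steps" # other option seconds
--
--     plan_step_ms = 400
--     proposed = []
--     fallback = []
--     stop = []
--     not_proposed = []
--
--     last_case = -1
--     cons_occ = 0
--     prop_inf = 0
--     for case in cases:
--         if case == 0: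
--             if last_case == case:
--                 cons_occ += 1
--             else:
--                 not_proposed.append(interval_unit(prop_inf, plan_step_ms, unit))
--                 prop_inf = 0
--                 if last_case == 1:
--                     fallback.append(interval_unit(cons_occ, plan_step_ms, unit))
--                 elif last_case == 2:
--                     stop.append(interval_unit(cons_occ, plan_step_ms, unit))
--                 cons_occ = 1
--                 last_case = 0
--         elif case == 1:
--             prop_inf +=1
--             if last_case == case:
--                 cons_occ += 1
--             else:
--                 if last_case == 0:
--                     proposed.append(interval_unit(cons_occ, plan_step_ms, unit))
--                 elif last_case == 2:
--                     stop.append(interval_unit(cons_occ, plan_step_ms, unit))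
--                 cons_occ = 1
--                 last_case = 1
--         elif case == 2:
--             prop_inf +=1
--             if last_case == case:
--                 cons_occ += 1
--             else:
--                 if last_case == 0:
--                     proposed.append(interval_unit(cons_occ, plan_step_ms, unit))
--                 elif last_case == 1:
--                     fallback.append(interval_unit(cons_occ, plan_step_ms, unit))
--                 cons_occ = 1
--                 last_case = 2
--     if last_case == 0:
--         proposed.append(interval_unit(cons_occ, plan_step_ms, unit))
--         if prop_inf > 0:
--             not_proposed.append(interval_unit(prop_inf, plan_step_ms, unit))
--     elif last_case == 1:
--         fallback.append(interval_unit(cons_occ, plan_step_ms, unit))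
--         not_proposed.append(interval_unit(prop_inf, plan_step_ms, unit))
--     elif last_case == 2:
--         not_proposed.append(interval_unit(prop_inf, plan_step_ms, unit))
--         stop.append(interval_unit(cons_occ, plan_step_ms, unit))
--     return [proposed, fallback, stop, not_proposed]
-- ===== SOURCE B (Python) =====
-- def consecutive_new_old_fallback(cases):
--     # Run-length encode the cases after filtering to {0,1,2}, then read each
--     # category straight off the runs.
--     runs = []
--     for c in cases:
--         if c == 0 or c == 1 or c == 2:
--             if runs and runs[-1][0] == c:
--                 runs[-1] = (c, runs[-1][1] + 1)
--             else:
--                 runs.append((c, 1))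
--     proposed = [n for v, n in runs if v == 0]
--     fallback = [n for v, n in runs if v == 1]
--     stop = [n for v, n in runs if v == 2]
--     not_proposed = []
--     acc = 0
--     for v, n in runs:
--         if v == 0:
--             not_proposed.append(acc)
--             acc = 0
--         else:
--             acc += n
--     if runs and runs[-1][0] != 0:
--         not_proposed.append(acc)
--     return [proposed, fallback, stop, not_proposed]
-- ===== Notes on version B (the rewrite author's own statement) =====
-- stated objective: simpler
-- what changed: Replaces A's seven-variable state machine (category lists, last_case, cons_occ, prop_inf updated across nested branches) by a run-length encoding of the cases filtered to {0,1,2}, from which each category list is read off directly.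
import Mathlib
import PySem

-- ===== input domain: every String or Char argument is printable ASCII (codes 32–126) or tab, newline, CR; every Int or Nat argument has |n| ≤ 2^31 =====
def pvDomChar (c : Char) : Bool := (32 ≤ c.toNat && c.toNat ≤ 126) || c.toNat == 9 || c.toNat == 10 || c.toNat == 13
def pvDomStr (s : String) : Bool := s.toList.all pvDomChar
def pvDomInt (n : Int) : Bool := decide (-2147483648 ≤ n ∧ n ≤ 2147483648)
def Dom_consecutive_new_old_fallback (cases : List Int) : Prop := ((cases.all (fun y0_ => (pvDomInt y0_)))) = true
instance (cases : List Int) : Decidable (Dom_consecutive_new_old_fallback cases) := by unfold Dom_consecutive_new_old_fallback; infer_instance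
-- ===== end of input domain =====

-- B replaces A's seven-variable state machine by a run-length encoding of the
-- filtered cases and reads each category off the runs (objective: simpler).

-- ===== PORT A =====
-- interval_unit; the Python else branch falls through returning None — unreachable here,
-- since every call in this module passes unit = "steps" (ported with 0 as placeholder).
def pvIntervalUnit (steps _plan_step_ms : Int) (unit : String) : Int :=
  if unit == "steps" then steps else 0

structure AState where
  p : List Int
  f : List Int
  s : List Int
  np : List Int
  last : Int
  cons : Int
  prop : Int
deriving Repr, DecidableEq

-- one iteration of A's for-loop
def pvStepA (unit : String) (plan : Int) (st : AState) (c : Int) : AState :=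
  if c == 0 then
    if st.last == c then { st with cons := st.cons + 1 }
    else
      { p := st.p
        f := if st.last == 1 then st.f ++ [pvIntervalUnit st.cons plan unit] else st.f
        s := if st.last == 2 then st.s ++ [pvIntervalUnit st.cons plan unit] else st.s
        np := st.np ++ [pvIntervalUnit st.prop plan unit]
        last := 0, cons := 1, prop := 0 }
  else if c == 1 then
    if st.last == c then { st with cons := st.cons + 1, prop := st.prop + 1 }
    else
      { p := if st.last == 0 then st.p ++ [pvIntervalUnit st.cons plan unit] else st.p
        f := st.f
        s := if st.last == 2 then st.s ++ [pvIntervalUnit st.cons plan unit] else st.s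
        np := st.np
        last := 1, cons := 1, prop := st.prop + 1 }
  else if c == 2 then
    if st.last == c then { st with cons := st.cons + 1, prop := st.prop + 1 }
    else
      { p := if st.last == 0 then st.p ++ [pvIntervalUnit st.cons plan unit] else st.p
        f := if st.last == 1 then st.f ++ [pvIntervalUnit st.cons plan unit] else st.f
        s := st.s
        np := st.np
        last := 2, cons := 1, prop := st.prop + 1 }
  else st

-- A's trailing if/elif block after the loop
def pvFinalA (unit : String) (plan : Int) (st : AState) : List (List Int) :=
  if st.last == 0 then
    [st.p ++ [pvIntervalUnit st.cons plan unit], st.f, st.s,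
     if st.prop > 0 then st.np ++ [pvIntervalUnit st.prop plan unit] else st.np]
  else if st.last == 1 then
    [st.p, st.f ++ [pvIntervalUnit st.cons plan unit], st.s,
     st.np ++ [pvIntervalUnit st.prop plan unit]]
  else if st.last == 2 then
    [st.p, st.f, st.s ++ [pvIntervalUnit st.cons plan unit],
     st.np ++ [pvIntervalUnit st.prop plan unit]]
  else [st.p, st.f, st.s, st.np]

def consecutive_new_old_fallback (cases : List Int) : List (List Int) :=
  let unit := "steps"
  let plan_step_ms : Int := 400
  pvFinalA unit plan_step_ms
    (cases.foldl (pvStepA unit plan_step_ms) ⟨[], [], [], [], -1, 0, 0⟩)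

-- ===== PORT B =====
-- one iteration of Source B's run-building loop (filter to {0,1,2}, extend or start a run)
def pvStepR (runs : List (Int × Int)) (c : Int) : List (Int × Int) :=
  if c == 0 || c == 1 || c == 2 then
    match runs.getLast? with
    | some (v, n) => if v == c then runs.dropLast ++ [(c, n + 1)] else runs ++ [(c, 1)]
    | none => runs ++ [(c, 1)]
  else runs

-- the comprehension [n for v, n in runs if v == w]
def pvProj (w : Int) (runs : List (Int × Int)) : List Int :=
  (runs.filter (fun r => r.1 == w)).map (fun r => r.2)

-- Source B's not_proposed loop: state (not_proposed, acc)
def pvNpFold (runs : List (Int × Int)) : List Int × Int :=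
  runs.foldl
    (fun (st : List Int × Int) r =>
      if r.1 == 0 then (st.1 ++ [st.2], 0) else (st.1, st.2 + r.2)) ([], 0)

def consecutive_new_old_fallback_alt (cases : List Int) : List (List Int) :=
  let runs := cases.foldl pvStepR []
  let proposed := pvProj 0 runs
  let fallback := pvProj 1 runs
  let stop := pvProj 2 runs
  let st := pvNpFold runs
  let not_proposed :=
    match runs.getLast? with
    | some (v, _) => if v != 0 then st.1 ++ [st.2] else st.1
    | none => st.1
  [proposed, fallback, stop, not_proposed]

-- ===== PRECONDITION & SPEC =====
def Spec_consecutive_new_old_fallback (cases : List Int) (out : List (List Int)) : Prop := out = consecutive_new_old_fallback_alt cases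
instance (cases : List Int) (out : List (List Int)) : Decidable (Spec_consecutive_new_old_fallback cases out) := by unfold Spec_consecutive_new_old_fallback; infer_instance

-- ===== CLAIM (what is proved, stated in full; the proofs are below) =====
def Claim_equal_consecutive_new_old_fallback : Prop := ∀ (cases : List Int), Dom_consecutive_new_old_fallback cases → Spec_consecutive_new_old_fallback cases (consecutive_new_old_fallback cases)

-- ===== LEMMAS AND PROOFS =====

-- runs produced by pvStepR carry only values 0,1,2
def pvWF (R : List (Int × Int)) : Prop := ∀ r ∈ R, r.1 = 0 ∨ r.1 = 1 ∨ r.1 = 2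

-- abstraction: A's loop state determined by the runs built so far
def pvG (R : List (Int × Int)) : AState :=
  match R.getLast? with
  | none => ⟨[], [], [], [], -1, 0, 0⟩
  | some (v, n) =>
      ⟨pvProj 0 R.dropLast, pvProj 1 R.dropLast, pvProj 2 R.dropLast,
       (pvNpFold R).1, v, n, (pvNpFold R).2⟩

theorem pvWF_step (R : List (Int × Int)) (c : Int) (h : pvWF R) : pvWF (pvStepR R c) := by
  intro r hr
  unfold pvStepR at hr
  by_cases hc : (c == 0 || c == 1 || c == 2) = true
  · have hc' : c = 0 ∨ c = 1 ∨ c = 2 := by simpa [or_assoc] using hc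
    simp only [hc, if_pos] at hr
    cases hL : R.getLast? with
    | none =>
        rw [hL] at hr
        simp only [List.mem_append, List.mem_singleton] at hr
        rcases hr with hr | hr
        · exact h r hr
        · rw [hr]; exact hc'
    | some p =>
        obtain ⟨v, n⟩ := p
        rw [hL] at hr
        by_cases hv : (v == c) = true
        · simp only [hv, if_pos, List.mem_append, List.mem_singleton] at hr
          rcases hr with hr | hr
          · exact h r (List.dropLast_subset _ hr)
          · rw [hr]; exact hc'
        · simp only [hv, if_neg, Bool.false_eq_true, not_false_iff,
            List.mem_append, List.mem_singleton] at hr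
          rcases hr with hr | hr
          · exact h r hr
          · rw [hr]; exact hc'
  · simp only [hc, if_neg, Bool.false_eq_true, not_false_iff] at hr
    exact h r hr

theorem pvStep_comm (R : List (Int × Int)) (c : Int) (h : pvWF R) :
    pvStepA "steps" 400 (pvG R) c = pvG (pvStepR R c) := by
  rcases List.eq_nil_or_concat R with rfl | ⟨C, ⟨v, n⟩, rfl⟩
  · by_cases h0 : c = 0
    · subst h0; decide
    by_cases h1 : c = 1
    · subst h1; decide
    by_cases h2 : c = 2
    · subst h2; decide
    simp [pvStepA, pvStepR, h0, h1, h2]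
  · have hv : v = 0 ∨ v = 1 ∨ v = 2 := h (v, n) (by simp)
    by_cases h0 : c = 0
    · subst h0
      rcases hv with rfl | rfl | rfl <;>
        simp [pvStepA, pvStepR, pvG, pvNpFold, pvProj, pvIntervalUnit,
          List.foldl_append, List.filter_append, add_assoc]
    by_cases h1 : c = 1
    · subst h1
      rcases hv with rfl | rfl | rfl <;>
        simp [pvStepA, pvStepR, pvG, pvNpFold, pvProj, pvIntervalUnit,
          List.foldl_append, List.filter_append, add_assoc]
    by_cases h2 : c = 2
    · subst h2
      rcases hv with rfl | rfl | rfl <;>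
        simp [pvStepA, pvStepR, pvG, pvNpFold, pvProj, pvIntervalUnit,
          List.foldl_append, List.filter_append, add_assoc]
    simp [pvStepA, pvStepR, h0, h1, h2]

theorem pvFold_comm (cases : List Int) (R : List (Int × Int)) (h : pvWF R) :
    cases.foldl (pvStepA "steps" 400) (pvG R) = pvG (cases.foldl pvStepR R) := by
  induction cases generalizing R with
  | nil => rfl
  | cons c cs ih =>
      simp only [List.foldl_cons, pvStep_comm R c h]
      exact ih _ (pvWF_step R c h)

theorem pvFinal_comm (R : List (Int × Int)) (h : pvWF R) :
    pvFinalA "steps" 400 (pvG R) =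
      [pvProj 0 R, pvProj 1 R, pvProj 2 R,
        match R.getLast? with
        | some (v, _) => if v != 0 then (pvNpFold R).1 ++ [(pvNpFold R).2] else (pvNpFold R).1
        | none => (pvNpFold R).1] := by
  rcases List.eq_nil_or_concat R with rfl | ⟨C, ⟨v, n⟩, rfl⟩
  · decide
  · have hv : v = 0 ∨ v = 1 ∨ v = 2 := h (v, n) (by simp)
    rcases hv with rfl | rfl | rfl <;>
      simp [pvFinalA, pvG, pvNpFold, pvProj, pvIntervalUnit,
        List.foldl_append]

theorem pvWF_fold (cases : List Int) (R : List (Int × Int)) (h : pvWF R) :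
    pvWF (cases.foldl pvStepR R) := by
  induction cases generalizing R with
  | nil => exact h
  | cons c cs ih => exact ih _ (pvWF_step R c h)

-- ===== VERDICT (by name: the statement is the Claim_ definition above) =====
theorem consecutive_new_old_fallback_spec : Claim_equal_consecutive_new_old_fallback := by
  intro cases _
  have hnil : pvWF ([] : List (Int × Int)) := by intro r hr; cases hr
  show pvFinalA "steps" 400
      (List.foldl (pvStepA "steps" 400) ⟨[], [], [], [], -1, 0, 0⟩ cases) =
    consecutive_new_old_fallback_alt cases
  rw [show (⟨[], [], [], [], -1, 0, 0⟩ : AState) = pvG [] from rfl,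
    pvFold_comm cases [] hnil, pvFinal_comm _ (pvWF_fold cases [] hnil)]
  rfl
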